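-- pv_equiv track=rewrite | github.com/samwata/Python-Is-Easy | I-O/connect4-game.py | check_four_in_column
-- ===== SOURCE A (Python) =====
-- def check_four_in_column(column_matrix):
--     for column in column_matrix:
--         counter = 0
--         length = len(column)
--         for i in range(1, length):
--             if column[i - 1] != " " and column[i] != " " and column[i - 1] == column[i]:
--                 counter += 1
--             else:
--                 counter = 0
--             if counter == 3:
--                 return column[i - 1]
--     return False
-- ===== SOURCE B (Python) =====
-- def check_four_in_column(column_matrix):
--     # Split each column into maximal runs of equal values (two-pointer groupby)
--     # and judge each run as a whole: a non-blank key with run length >= 4 wins.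
--     for column in column_matrix:
--         n = len(column)
--         i = 0
--         while i < n:
--             j = i
--             while j < n and column[j] == column[i]:
--                 j += 1
--             if column[i] != " " and j - i >= 4:
--                 return column[i]
--             i = j
--     return False
-- ===== Notes on version B (the rewrite author's own statement) =====
-- stated objective: alternative
-- what changed: Replaced the incremental adjacent-pair counter carried across the index loop with a two-pointer groupby that splits each column into maximal runs of equal values and judges each whole run (non-blank key, length >= 4) at once.
import Mathlib
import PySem

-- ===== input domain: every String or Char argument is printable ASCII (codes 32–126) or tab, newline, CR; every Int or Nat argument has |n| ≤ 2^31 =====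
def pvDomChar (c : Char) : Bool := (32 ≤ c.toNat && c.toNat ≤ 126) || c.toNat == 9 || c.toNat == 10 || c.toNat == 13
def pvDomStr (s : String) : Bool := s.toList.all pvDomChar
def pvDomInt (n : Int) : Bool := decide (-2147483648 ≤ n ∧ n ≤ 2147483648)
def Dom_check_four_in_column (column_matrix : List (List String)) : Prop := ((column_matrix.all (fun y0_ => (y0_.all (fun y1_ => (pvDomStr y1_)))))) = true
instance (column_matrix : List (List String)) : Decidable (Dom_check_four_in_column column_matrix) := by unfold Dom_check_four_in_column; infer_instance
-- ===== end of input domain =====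

-- B splits each column into maximal runs of equal values (two-pointer groupby) and judges each
-- whole run at once, instead of A's adjacent-pair counter carried across the index loop
-- (alternative decomposition, same cost). Python returns the winning token (a str) or False;
-- under the Bool convention both ports return that value's truthiness ('' is the only falsy str).


-- ===== PORT A =====
-- inner 'for i in range(1, length)' loop carrying 'counter'; 'return column[i - 1]' returns
-- the winning token (some tok here).
def pvInnerA (col : List String) : List Int → Int → Option String
  | [], _ => none
  | i :: rest, counter =>
    let counter' :=
      if PySem.List.pyGetD col (i - 1) "" ≠ " " ∧ PySem.List.pyGetD col i "" ≠ " " ∧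
         PySem.List.pyGetD col (i - 1) "" = PySem.List.pyGetD col i "" then counter + 1 else 0
    if counter' = 3 then some (PySem.List.pyGetD col (i - 1) "") else pvInnerA col rest counter'

-- Python returns the token (str) or False; Bool convention: the token's truthiness.
def check_four_in_column (column_matrix : List (List String)) : Bool :=
  match column_matrix with
  | [] => false
  | column :: rest =>
    match pvInnerA column (PySem.List.pyRange 1 (column.length : Int) 1) 0 with
    | some t => decide (t ≠ "")
    | none => check_four_in_column rest

-- ===== PORT B =====
-- inner 'while j < n and column[j] == column[i]: j += 1' — end of the maximal run at i
def pvRunEnd (col : List String) (v : String) (j : Nat) : Nat :=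
  if h : j < col.length ∧ col.getD j "" = v then pvRunEnd col v (j + 1) else j
termination_by col.length - j
decreasing_by omega

-- cited by pvScanCol's decreasing_by (termination helper, hence above the port)
lemma pvRunEnd_gt (col : List String) (i : Nat) (h : i < col.length) :
    i < pvRunEnd col (col.getD i "") i := by
  rw [pvRunEnd, dif_pos ⟨h, rfl⟩]
  have : ∀ j, j ≤ pvRunEnd col (col.getD i "") j := by
    intro j
    induction j using pvRunEnd.induct col (col.getD i "") with
    | case1 j hj ih => rw [pvRunEnd, dif_pos hj]; omega
    | case2 j hj => rw [pvRunEnd, dif_neg hj]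
  have := this (i + 1); omega

-- outer 'while i < n' loop of B: judge the run starting at i, then jump to its end
def pvScanCol (col : List String) (i : Nat) : Option String :=
  if h : i < col.length then
    let j := pvRunEnd col (col.getD i "") i
    if col.getD i "" ≠ " " ∧ 4 ≤ j - i then some (col.getD i "")
    else pvScanCol col j
  else none
termination_by col.length - i
decreasing_by exact Nat.sub_lt_sub_left h (pvRunEnd_gt col i h)

def check_four_in_column_alt (column_matrix : List (List String)) : Bool :=
  match column_matrix with
  | [] => false
  | column :: rest =>
    match pvScanCol column 0 with
    | some t => decide (t ≠ "")
    | none => check_four_in_column_alt rest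

-- ===== PRECONDITION & SPEC =====
def Spec_check_four_in_column (column_matrix : List (List String)) (out : Bool) : Prop := out = check_four_in_column_alt column_matrix
instance (column_matrix : List (List String)) (out : Bool) : Decidable (Spec_check_four_in_column column_matrix out) := by unfold Spec_check_four_in_column; infer_instance

-- ===== CLAIM (what is proved, stated in full; the proofs are below) =====
def Claim_equal_check_four_in_column : Prop := ∀ (column_matrix : List (List String)), Dom_check_four_in_column column_matrix → Spec_check_four_in_column column_matrix (check_four_in_column column_matrix)

-- ===== LEMMAS AND PROOFS =====

lemma pvRunEnd_le (col : List String) (v : String) (j : Nat) (hj : j ≤ col.length) :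
    pvRunEnd col v j ≤ col.length := by
  induction j using pvRunEnd.induct col v with
  | case1 j h ih => rw [pvRunEnd, dif_pos h]; exact ih (by omega)
  | case2 j h => rw [pvRunEnd, dif_neg h]; exact hj

lemma pvRunEnd_mem (col : List String) (v : String) (j : Nat) :
    ∀ k, j ≤ k → k < pvRunEnd col v j → col.getD k "" = v := by
  induction j using pvRunEnd.induct col v with
  | case1 j h ih =>
    intro k hk1 hk2
    rw [pvRunEnd, dif_pos h] at hk2
    rcases Nat.eq_or_lt_of_le hk1 with rfl | hlt
    · exact h.2
    · exact ih k hlt hk2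
  | case2 j h =>
    intro k hk1 hk2
    rw [pvRunEnd, dif_neg h] at hk2
    omega

lemma pvRunEnd_stop (col : List String) (v : String) (j : Nat) (hjn : j ≤ col.length) :
    pvRunEnd col v j = col.length ∨ col.getD (pvRunEnd col v j) "" ≠ v := by
  induction j using pvRunEnd.induct col v with
  | case1 j h ih => rw [pvRunEnd, dif_pos h]; exact ih (by omega)
  | case2 j h =>
    rw [pvRunEnd, dif_neg h]
    by_cases hj : j < col.length
    · right; intro hv; exact h ⟨hj, hv⟩
    · left; omega

-- pvInnerA over a blank run: every step resets the counter to 0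
lemma pvInnerA_blank (col : List String) (i j : Nat)
    (hb : ∀ l, i ≤ l → l < j → col.getD l "" = " ") :
    ∀ k, i + 1 ≤ k → k ≤ j + 1 →
    pvInnerA col (PySem.List.pyRange (k : Int) (col.length : Int) 1) 0 =
    pvInnerA col (PySem.List.pyRange ((j : Int) + 1) (col.length : Int) 1) 0 := by
  intro k hk1 hk2
  induction hd : j + 1 - k generalizing k with
  | zero => rw [show ((k : Int)) = ((j : Int) + 1) by omega]
  | succ d ih =>
    have hkj : k ≤ j := by omega
    by_cases hkn : k < col.length
    · rw [PySem.List.pyRange_one_cons (by exact_mod_cast hkn)]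
      have hc : ((k : Int) - 1) = ((k - 1 : Nat) : Int) := by omega
      simp only [pvInnerA, hc, PySem.List.pyGetD_natCast]
      have hbl : col.getD (k - 1) "" = " " := hb (k - 1) (by omega) (by omega)
      have hcond : ¬(col.getD (k - 1) "" ≠ " " ∧ col.getD k "" ≠ " " ∧
          col.getD (k - 1) "" = col.getD k "") := fun h => h.1 hbl
      simp only [if_neg hcond]
      rw [if_neg (by norm_num : ¬(0 : Int) = 3)]
      rw [show ((k : Int) + 1) = ((k + 1 : Nat) : Int) by omega]
      exact ih (k + 1) (by omega) (by omega) (by omega)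
    · rw [PySem.List.pyRange_one_eq_nil (by exact_mod_cast Nat.le_of_not_lt hkn),
        PySem.List.pyRange_one_eq_nil (by exact_mod_cast (by omega : col.length ≤ j + 1))]

-- pvInnerA over a short (< 4) non-blank run: the counter never reaches 3
lemma pvInnerA_short (col : List String) (i j : Nat) (v : String)
    (hv : v ≠ " ") (hrun : ∀ l, i ≤ l → l < j → col.getD l "" = v)
    (hstop : j = col.length ∨ col.getD j "" ≠ v) (hlen : j - i ≤ 3) :
    ∀ k, i + 1 ≤ k → k ≤ j →
    pvInnerA col (PySem.List.pyRange (k : Int) (col.length : Int) 1) ((k - i - 1 : Nat) : Int) =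
    pvInnerA col (PySem.List.pyRange ((j : Int) + 1) (col.length : Int) 1) 0 := by
  intro k hk1 hk2
  induction hd : j - k generalizing k with
  | zero =>
    -- k = j: the boundary step (or the end of the range)
    have hkj : k = j := by omega
    subst hkj
    by_cases hkn : k < col.length
    · rw [PySem.List.pyRange_one_cons (by exact_mod_cast hkn)]
      have hc : ((k : Int) - 1) = ((k - 1 : Nat) : Int) := by omega
      simp only [pvInnerA, hc, PySem.List.pyGetD_natCast]
      have hprev : col.getD (k - 1) "" = v := hrun (k - 1) (by omega) (by omega)
      have hne : col.getD k "" ≠ v := by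
        rcases hstop with h | h
        · omega
        · exact h
      have hcond : ¬(col.getD (k - 1) "" ≠ " " ∧ col.getD k "" ≠ " " ∧
          col.getD (k - 1) "" = col.getD k "") := by
        rw [hprev]; rintro ⟨-, -, h⟩; exact hne h.symm
      simp only [if_neg hcond]
      rw [if_neg (by norm_num : ¬(0 : Int) = 3)]
    · rw [PySem.List.pyRange_one_eq_nil (by exact_mod_cast Nat.le_of_not_lt hkn),
        PySem.List.pyRange_one_eq_nil (by exact_mod_cast (by omega : col.length ≤ k + 1))]
      rfl
  | succ d ih =>
    have hkj : k < j := by omega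
    by_cases hkn : k < col.length
    · rw [PySem.List.pyRange_one_cons (by exact_mod_cast hkn)]
      have hc : ((k : Int) - 1) = ((k - 1 : Nat) : Int) := by omega
      simp only [pvInnerA, hc, PySem.List.pyGetD_natCast]
      have hprev : col.getD (k - 1) "" = v := hrun (k - 1) (by omega) (by omega)
      have hcur : col.getD k "" = v := hrun k (by omega) hkj
      have hcond : col.getD (k - 1) "" ≠ " " ∧ col.getD k "" ≠ " " ∧
          col.getD (k - 1) "" = col.getD k "" := by rw [hprev, hcur]; exact ⟨hv, hv, rfl⟩
      simp only [if_pos hcond]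
      have hlt : k - i ≤ 2 := by omega
      rw [if_neg (show ¬((k - i - 1 : Nat) : Int) + 1 = 3 by omega)]
      rw [show ((k - i - 1 : Nat) : Int) + 1 = ((k + 1 - i - 1 : Nat) : Int) by omega,
        show ((k : Int) + 1) = ((k + 1 : Nat) : Int) by omega]
      exact ih (k + 1) (by omega) (by omega) (by omega)
    · rw [PySem.List.pyRange_one_eq_nil (by exact_mod_cast Nat.le_of_not_lt hkn),
        PySem.List.pyRange_one_eq_nil (by exact_mod_cast (by omega : col.length ≤ j + 1))]
      rfl

-- main correspondence: B's run scan from i equals A's counter scan over indices i+1..n-1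
lemma pvScan_eq_inner (col : List String) :
    ∀ i, i ≤ col.length →
    pvScanCol col i =
      pvInnerA col (PySem.List.pyRange ((i : Int) + 1) (col.length : Int) 1) 0 := by
  intro i hi
  induction hd : col.length - i using Nat.strong_induction_on generalizing i with
  | _ n ih =>
  by_cases hlt : i < col.length
  · set v := col.getD i "" with hv
    set j := pvRunEnd col v i with hj
    have hij : i < j := pvRunEnd_gt col i hlt
    have hjn : j ≤ col.length := pvRunEnd_le col v i (by omega)
    have hrun : ∀ k, i ≤ k → k < j → col.getD k "" = v := pvRunEnd_mem col v i
    have hstop : j = col.length ∨ col.getD j "" ≠ v := pvRunEnd_stop col v i (by omega)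
    rw [pvScanCol, dif_pos hlt]
    by_cases hwin : v ≠ " " ∧ 4 ≤ j - i
    · -- winning run: A's counter reaches 3 at index i+3 and returns col[i+2] = v
      rw [if_pos hwin]
      have h1 : i + 1 < col.length := by omega
      have h2 : i + 2 < col.length := by omega
      have h3 : i + 3 < col.length := by omega
      rw [PySem.List.pyRange_one_cons (by exact_mod_cast h1)]
      rw [show ((i : Int) + 1 + 1) = ((i + 2 : Nat) : Int) by omega]
      rw [PySem.List.pyRange_one_cons (by exact_mod_cast h2)]
      rw [show ((i + 2 : Nat) : Int) + 1 = ((i + 3 : Nat) : Int) by omega]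
      rw [PySem.List.pyRange_one_cons (by exact_mod_cast h3)]
      have e0 : col.getD i "" = v := rfl
      have e1 : col.getD (i + 1) "" = v := hrun (i + 1) (by omega) (by omega)
      have e2 : col.getD (i + 2) "" = v := hrun (i + 2) (by omega) (by omega)
      have e3 : col.getD (i + 3) "" = v := hrun (i + 3) (by omega) (by omega)
      simp only [pvInnerA,
        show ((i + 1 : Nat) : Int) - 1 = ((i : Nat) : Int) by omega,
        show ((i : Int) + 1) = ((i + 1 : Nat) : Int) by omega,
        show ((i + 2 : Nat) : Int) - 1 = ((i + 1 : Nat) : Int) by omega,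
        show ((i + 3 : Nat) : Int) - 1 = ((i + 2 : Nat) : Int) by omega,
        PySem.List.pyGetD_natCast]
      have c1 : col.getD i "" ≠ " " ∧ col.getD (i + 1) "" ≠ " " ∧
          col.getD i "" = col.getD (i + 1) "" := by rw [e0, e1]; exact ⟨hwin.1, hwin.1, rfl⟩
      have c2 : col.getD (i + 1) "" ≠ " " ∧ col.getD (i + 2) "" ≠ " " ∧
          col.getD (i + 1) "" = col.getD (i + 2) "" := by rw [e1, e2]; exact ⟨hwin.1, hwin.1, rfl⟩
      have c3 : col.getD (i + 2) "" ≠ " " ∧ col.getD (i + 3) "" ≠ " " ∧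
          col.getD (i + 2) "" = col.getD (i + 3) "" := by rw [e2, e3]; exact ⟨hwin.1, hwin.1, rfl⟩
      simp only [if_pos c1, if_pos c2, if_pos c3]
      rw [if_neg (by norm_num : ¬(0 : Int) + 1 = 3)]
      rw [if_neg (by norm_num : ¬(0 : Int) + 1 + 1 = 3)]
      rw [if_pos (by norm_num : (0 : Int) + 1 + 1 + 1 = 3)]
      rw [e2]
    · -- non-winning run: A's counter is back to 0 after index j; recurse at j
      rw [if_neg hwin]
      have hrec := ih (col.length - j) (by omega) j hjn rfl
      rw [hrec]
      by_cases hbl : v = " "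
      · -- blank run: every step keeps counter 0
        have := pvInnerA_blank col i j
          (fun l hl1 hl2 => by rw [hrun l hl1 hl2, hbl]) (i + 1) (by omega) (by omega)
        rw [show ((i : Int) + 1) = ((i + 1 : Nat) : Int) by omega, this]
      · -- short non-blank run (length ≤ 3): counter never reaches 3
        have hlen : j - i ≤ 3 := by by_contra hge; exact hwin ⟨hbl, by omega⟩
        have := pvInnerA_short col i j v hbl hrun hstop hlen (i + 1) (by omega) (by omega)
        rw [show ((i : Int) + 1) = ((i + 1 : Nat) : Int) by omega]
        rw [show ((0 : Int)) = ((i + 1 - i - 1 : Nat) : Int) by omega] at this ⊢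
        rw [this]
  · have hin : i = col.length := by omega
    rw [pvScanCol, dif_neg hlt,
      PySem.List.pyRange_one_eq_nil (by exact_mod_cast (by omega : col.length ≤ i + 1))]
    rfl

lemma pvLists : ∀ (cm : List (List String)),
    check_four_in_column cm = check_four_in_column_alt cm := by
  intro cm
  induction cm with
  | nil => rfl
  | cons col rest ih =>
    show (match pvInnerA col (PySem.List.pyRange 1 (col.length : Int) 1) 0 with
          | some t => decide (t ≠ "")
          | none => check_four_in_column rest) =
         (match pvScanCol col 0 with
          | some t => decide (t ≠ "")
          | none => check_four_in_column_alt rest)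
    rw [pvScan_eq_inner col 0 (by omega)]
    norm_num
    cases pvInnerA col (PySem.List.pyRange 1 (col.length : Int) 1) 0 with
    | none => exact ih
    | some t => rfl

-- ===== VERDICT (by name: the statement is the Claim_ definition above) =====
theorem check_four_in_column_spec : Claim_equal_check_four_in_column := by
  intro cm _
  exact pvLists cm
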